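-- pv_equiv track=rewrite | github.com/GustavoCortezia/case_study_aws_unisinos | aws_lambda.py | fix_csv_newlines
-- ===== SOURCE A (Python) =====
-- def fix_csv_newlines(raw_text):
--     """
--     Junta linhas quebradas dentro de campos não-quotados corretamente.
--     Lógica: acumula linhas até que o número de aspas (") no bloco seja par,
--     então considera esse bloco uma linha completa do CSV.
--     Retorna o CSV "limpo" como uma string com quebras de linha normais.
--     """
--     lines = raw_text.splitlines()
--     cleaned_lines = []
--     buffer = []
--     quote_count = 0
--
--     for line in lines:
--         # conta aspas nesta linha
--         q = line.count('"')
--         buffer.append(line)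
--         quote_count += q
--
--         # se o número de aspas acumuladas é par -> registro completo
--         if quote_count % 2 == 0:
--             # junta o bloco substituindo quebras internas por espaço
--             # mantendo a integridade dos separadores
--             block = '\n'.join(buffer)
--             # opcional: substituir quebras internas de linha entre aspas por espaço
--             # porém como garantimos que as aspas estão balanceadas, podemos normalizar
--             # Substituir \r\n e \r por \n foi feito no splitlines.
--             cleaned_lines.append(block)
--             buffer = []
--             quote_count = 0
--         else:
--             # ainda dentro de um campo com quebra de linha; continua acumulando
--             continue
--
--     # se sobrar algo no buffer (não balanceado), junta de qualquer forma
--     if buffer: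
--         cleaned_lines.append('\n'.join(buffer))
--
--     return '\n'.join(cleaned_lines)
-- ===== SOURCE B (Python) =====
-- def fix_csv_newlines(raw_text):
--     # Every separator A uses (inside blocks and between blocks) is '\n',
--     # so the quote-balancing grouping is output-invariant: the result is
--     # simply the lines re-joined with '\n'.
--     return '\n'.join(raw_text.splitlines())
-- ===== Notes on version B (the rewrite author's own statement) =====
-- stated objective: simpler
-- what changed: Replaced the quote-counting buffer loop by the closed-form '\n'.join(raw_text.splitlines()): since both the intra-block and inter-block joins use '\n', the grouping never affects the output.
import Mathlib
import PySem

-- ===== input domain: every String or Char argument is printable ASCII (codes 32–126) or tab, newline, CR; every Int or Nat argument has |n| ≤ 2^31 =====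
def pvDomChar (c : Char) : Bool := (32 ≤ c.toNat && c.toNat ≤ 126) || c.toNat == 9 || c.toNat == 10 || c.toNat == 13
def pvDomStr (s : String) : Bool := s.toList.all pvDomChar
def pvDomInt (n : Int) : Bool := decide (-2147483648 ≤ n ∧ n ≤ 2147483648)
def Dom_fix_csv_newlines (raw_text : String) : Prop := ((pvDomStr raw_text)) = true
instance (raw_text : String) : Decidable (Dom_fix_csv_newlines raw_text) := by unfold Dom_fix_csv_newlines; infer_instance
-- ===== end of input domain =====

-- B replaces A's quote-balancing buffer loop with the closed form join "\n" (splitlines raw_text);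
-- the grouping never affects the output because every join A performs uses "\n".


-- ===== PORT A =====
-- loop body of the `for line in lines:` loop; state = (cleaned_lines, buffer, quote_count)
def fixCsvStep (st : List String × List String × Int) (line : String) :
    List String × List String × Int :=
  let cleaned := st.1
  let buffer := st.2.1
  let quote_count := st.2.2
  let q : Int := (PySem.Str.count line "\"" : Int)
  let buffer := buffer ++ [line]
  let quote_count := quote_count + q
  if PySem.Int.mod quote_count 2 == 0 then
    (cleaned ++ [PySem.Str.join "\n" buffer], [], 0)
  else
    (cleaned, buffer, quote_count)

def fix_csv_newlines (raw_text : String) : String :=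
  let lines := PySem.Str.splitlines raw_text
  let st := lines.foldl fixCsvStep ([], [], 0)
  -- `if buffer:` epilogue
  let cleaned := if st.2.1 = [] then st.1 else st.1 ++ [PySem.Str.join "\n" st.2.1]
  PySem.Str.join "\n" cleaned

-- ===== PORT B =====
def fix_csv_newlines_alt (raw_text : String) : String :=
  PySem.Str.join "\n" (PySem.Str.splitlines raw_text)

-- ===== PRECONDITION & SPEC =====
def Spec_fix_csv_newlines (raw_text : String) (out : String) : Prop := out = fix_csv_newlines_alt raw_text
instance (raw_text : String) (out : String) : Decidable (Spec_fix_csv_newlines raw_text out) := by unfold Spec_fix_csv_newlines; infer_instance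

-- ===== CLAIM (what is proved, stated in full; the proofs are below) =====
def Claim_equal_fix_csv_newlines : Prop := ∀ (raw_text : String), Dom_fix_csv_newlines raw_text → Spec_fix_csv_newlines raw_text (fix_csv_newlines raw_text)

-- ===== LEMMAS AND PROOFS =====

-- join with a nonempty tail peels its head (join_cons_cons restated for an unshaped nonempty tail)
theorem join_cons_ne (sep a : List Char) (l : List (List Char)) (h : l ≠ []) :
    PySem.Chars.join sep (a :: l) = a ++ sep ++ PySem.Chars.join sep l := by
  cases l with
  | nil => exact absurd rfl h
  | cons q rest => exact PySem.Chars.join_cons_cons sep a q rest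

-- a joined nonempty group at the head of the list can be flattened back into the list
theorem join_flatten_head (sep : List Char) (bs cs : List (List Char)) (hbs : bs ≠ []) :
    PySem.Chars.join sep (PySem.Chars.join sep bs :: cs) =
      PySem.Chars.join sep (bs ++ cs) := by
  induction bs with
  | nil => exact absurd rfl hbs
  | cons b bs' ih =>
    cases bs' with
    | nil => simp [PySem.Chars.join_singleton]
    | cons b2 bs'' =>
      have hne : (b2 :: bs'') ≠ [] := by simp
      rw [join_cons_ne sep b (b2 :: bs'') hne]
      cases cs with
      | nil =>
        simp only [List.append_nil]
        rw [PySem.Chars.join_singleton, join_cons_ne sep b (b2 :: bs'') hne]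
      | cons c cs' =>
        have hcs : (c :: cs') ≠ [] := by simp
        rw [join_cons_ne sep (b ++ sep ++ PySem.Chars.join sep (b2 :: bs'')) (c :: cs') hcs]
        have hbc : (b2 :: bs'') ++ c :: cs' ≠ [] := by simp
        rw [List.cons_append, join_cons_ne sep b ((b2 :: bs'') ++ c :: cs') hbc]
        rw [← ih hne]
        rw [join_cons_ne sep (PySem.Chars.join sep (b2 :: bs'')) (c :: cs') hcs]
        simp [List.append_assoc]

-- a joined nonempty group anywhere in the list can be flattened back into the list
theorem join_flatten (sep : List Char) (as bs cs : List (List Char)) (hbs : bs ≠ []) :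
    PySem.Chars.join sep (as ++ [PySem.Chars.join sep bs] ++ cs) =
      PySem.Chars.join sep (as ++ bs ++ cs) := by
  induction as with
  | nil => simpa using join_flatten_head sep bs cs hbs
  | cons a as' ih =>
    have h1 : as' ++ [PySem.Chars.join sep bs] ++ cs ≠ [] := by simp
    have h2 : as' ++ bs ++ cs ≠ [] := by
      cases bs with
      | nil => exact absurd rfl hbs
      | cons x xs => simp
    rw [List.cons_append, List.cons_append, join_cons_ne sep a _ h1,
        List.cons_append, List.cons_append, join_cons_ne sep a _ h2, ih]

-- String-level flattening, through toList
theorem strjoin_flatten (as bs cs : List String) (hbs : bs ≠ []) :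
    PySem.Str.join "\n" (as ++ [PySem.Str.join "\n" bs] ++ cs) =
      PySem.Str.join "\n" (as ++ bs ++ cs) := by
  unfold PySem.Str.join
  congr 1
  simp only [List.map_append, List.map_cons, List.map_nil, String.toList_ofList]
  have hbs' : bs.map String.toList ≠ [] := by simpa using hbs
  simpa using join_flatten "\n".toList (as.map String.toList) (bs.map String.toList)
    (cs.map String.toList) hbs'

-- A's epilogue: flush a leftover buffer, if any
def fixCsvFinish (st : List String × List String × Int) : List String :=
  if st.2.1 = [] then st.1 else st.1 ++ [PySem.Str.join "\n" st.2.1]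

theorem fixCsvStep_eq (cleaned buffer : List String) (qc : Int) (line : String) :
    fixCsvStep (cleaned, buffer, qc) line =
      if PySem.Int.mod (qc + (PySem.Str.count line "\"" : Int)) 2 == 0 then
        (cleaned ++ [PySem.Str.join "\n" (buffer ++ [line])], [], 0)
      else
        (cleaned, buffer ++ [line], qc + (PySem.Str.count line "\"" : Int)) := rfl

-- the flushed/unflushed result of A's loop joins to the same string as the raw lines
theorem loop_invariant (rest cleaned buffer : List String) (qc : Int) :
    PySem.Str.join "\n" (fixCsvFinish (rest.foldl fixCsvStep (cleaned, buffer, qc))) =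
      PySem.Str.join "\n" (cleaned ++ buffer ++ rest) := by
  induction rest generalizing cleaned buffer qc with
  | nil =>
    unfold fixCsvFinish
    by_cases hb : buffer = []
    · simp [hb]
    · rw [if_neg (by simpa using hb)]
      simpa using strjoin_flatten cleaned buffer [] hb
  | cons line rest ih =>
    rw [List.foldl_cons, fixCsvStep_eq]
    by_cases hmod : PySem.Int.mod (qc + (PySem.Str.count line "\"" : Int)) 2 == 0
    · rw [if_pos hmod, ih]
      have hbuf : buffer ++ [line] ≠ [] := by simp
      have h := strjoin_flatten cleaned (buffer ++ [line]) rest hbuf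
      simp only [List.append_assoc] at h ⊢
      simpa using h
    · rw [if_neg hmod, ih]
      simp [List.append_assoc]

-- ===== VERDICT (by name: the statement is the Claim_ definition above) =====
theorem fix_csv_newlines_spec : Claim_equal_fix_csv_newlines := by
  intro raw_text _
  unfold Spec_fix_csv_newlines fix_csv_newlines fix_csv_newlines_alt
  have h := loop_invariant (PySem.Str.splitlines raw_text) [] [] 0
  unfold fixCsvFinish at h
  simpa using h
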